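-- pv_equiv track=rewrite | github.com/mkreman/ShareApp | utils.py | get_upi_ids
-- ===== SOURCE A (Python) =====
-- def get_upi_ids(upi_ids):
--     upi_ids = upi_ids.strip().split(',')
--     res = ['', '', '']
--     for upi in upi_ids:
--         if upi.split('@')[-1] == 'ybl':
--             res[0] = upi
--         elif upi.split('@')[-1][:2] == 'ok':
--             res[1] = upi
--         elif upi.split('@')[-1] == 'paytm':
--             res[2] = upi
--     return res
-- ===== SOURCE B (Python) =====
-- def get_upi_ids(upi_ids):
--     ids = upi_ids.strip().split(',')
--
--     def last_match(pred):
--         matches = [u for u in ids if pred(u)]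
--         return matches[-1] if matches else ''
--
--     return [last_match(lambda u: u.split('@')[-1] == 'ybl'),
--             last_match(lambda u: u.split('@')[-1][:2] == 'ok'),
--             last_match(lambda u: u.split('@')[-1] == 'paytm')]
-- ===== Notes on version B (the rewrite author's own statement) =====
-- stated objective: alternative
-- what changed: Replaces the single loop with an if/elif chain mutating three slots by three independent last-match scans, one per provider predicate (the predicates are mutually exclusive, so the elif ordering is immaterial).
import Mathlib
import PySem

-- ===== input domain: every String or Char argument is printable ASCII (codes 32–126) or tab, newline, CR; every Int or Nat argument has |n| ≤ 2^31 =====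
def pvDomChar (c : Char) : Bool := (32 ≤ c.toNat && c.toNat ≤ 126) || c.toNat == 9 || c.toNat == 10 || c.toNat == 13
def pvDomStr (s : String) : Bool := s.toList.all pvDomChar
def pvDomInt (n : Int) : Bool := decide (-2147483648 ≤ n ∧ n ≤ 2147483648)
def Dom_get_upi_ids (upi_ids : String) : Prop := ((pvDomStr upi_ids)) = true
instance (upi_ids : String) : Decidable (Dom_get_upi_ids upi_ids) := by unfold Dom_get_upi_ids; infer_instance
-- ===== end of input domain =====

-- B replaces A's single loop with an if/elif chain by three independent last-match scans,
-- one per provider predicate (alternative decomposition, same O(n) cost).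



-- ===== PORT A =====
-- upi.split('@')[-1]: the separators are nonempty so split? is some, and split never returns
-- an empty list so the [-1] never raises; both .getD defaults are unreachable
def pvSuffix (u : String) : String :=
  (PySem.List.pyGet? ((PySem.Str.split? u "@").getD []) (-1)).getD ""

def get_upi_ids (upi_ids : String) : List String :=
  let ids := (PySem.Str.split? (PySem.Str.strip upi_ids) ",").getD []
  let r := ids.foldl (fun (r : String × String × String) upi =>
    if pvSuffix upi == "ybl" then (upi, r.2.1, r.2.2)
    else if PySem.Str.slice (pvSuffix upi) none (some 2) == "ok" then (r.1, upi, r.2.2)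
    else if pvSuffix upi == "paytm" then (r.1, r.2.1, upi)
    else r) ("", "", "")
  [r.1, r.2.1, r.2.2]

-- ===== PORT B =====
-- matches[-1] if matches else ''
def pvLastMatch (p : String → Bool) (ids : List String) : String :=
  match PySem.List.pyGet? (ids.filter p) (-1) with
  | some x => x
  | none => ""

def get_upi_ids_alt (upi_ids : String) : List String :=
  let ids := (PySem.Str.split? (PySem.Str.strip upi_ids) ",").getD []
  [pvLastMatch (fun u => pvSuffix u == "ybl") ids,
   pvLastMatch (fun u => PySem.Str.slice (pvSuffix u) none (some 2) == "ok") ids,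
   pvLastMatch (fun u => pvSuffix u == "paytm") ids]

-- ===== PRECONDITION & SPEC =====
def Spec_get_upi_ids (upi_ids : String) (out : List String) : Prop := out = get_upi_ids_alt upi_ids
instance (upi_ids : String) (out : List String) : Decidable (Spec_get_upi_ids upi_ids out) := by unfold Spec_get_upi_ids; infer_instance

-- ===== CLAIM (what is proved, stated in full; the proofs are below) =====
def Claim_equal_get_upi_ids : Prop := ∀ (upi_ids : String), Dom_get_upi_ids upi_ids → Spec_get_upi_ids upi_ids (get_upi_ids upi_ids)

-- ===== LEMMAS AND PROOFS =====
-- last match with a default accumulator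
def pvLastD (p : String → Bool) (ids : List String) (d : String) : String :=
  ((ids.filter p).getLast?).getD d

lemma pvLastD_cons (p : String → Bool) (x : String) (xs : List String) (d : String) :
    pvLastD p (x :: xs) d = if p x then pvLastD p xs x else pvLastD p xs d := by
  cases h : p x with
  | false => simp [pvLastD, h]
  | true => simp [pvLastD, h, List.getLast?_cons]

lemma pvLastMatch_eq (p : String → Bool) (ids : List String) :
    pvLastMatch p ids = pvLastD p ids "" := by
  simp only [pvLastMatch, PySem.List.pyGet?_neg_one, pvLastD]
  cases (ids.filter p).getLast? <;> rfl

lemma ybl_not_ok (u : String) (h : pvSuffix u = "ybl") :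
    (PySem.Str.slice (pvSuffix u) none (some 2) == "ok") = false := by
  rw [h]; decide

lemma ybl_not_paytm (u : String) (h : pvSuffix u = "ybl") :
    (pvSuffix u == "paytm") = false := by
  rw [h]; decide

lemma ok_not_paytm (u : String) (h : PySem.Str.slice (pvSuffix u) none (some 2) = "ok") :
    (pvSuffix u == "paytm") = false := by
  by_contra hc
  have hp : pvSuffix u = "paytm" := by
    simpa using (Bool.not_eq_false _).mp hc
  rw [hp] at h
  exact absurd h (by decide)

lemma fold_eq (ids : List String) (a b c : String) :
    ids.foldl (fun (r : String × String × String) upi =>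
      if pvSuffix upi == "ybl" then (upi, r.2.1, r.2.2)
      else if PySem.Str.slice (pvSuffix upi) none (some 2) == "ok" then (r.1, upi, r.2.2)
      else if pvSuffix upi == "paytm" then (r.1, r.2.1, upi)
      else r) (a, b, c)
    = (pvLastD (fun u => pvSuffix u == "ybl") ids a,
       pvLastD (fun u => PySem.Str.slice (pvSuffix u) none (some 2) == "ok") ids b,
       pvLastD (fun u => pvSuffix u == "paytm") ids c) := by
  induction ids generalizing a b c with
  | nil => simp [pvLastD]
  | cons x xs ih =>
    simp only [List.foldl_cons, pvLastD_cons]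
    by_cases h1 : (pvSuffix x == "ybl") = true
    · have hx : pvSuffix x = "ybl" := by simpa using h1
      rw [if_pos h1, ih]
      simp [h1, ybl_not_ok x hx, ybl_not_paytm x hx]
    · rw [if_neg h1]
      by_cases h2 : (PySem.Str.slice (pvSuffix x) none (some 2) == "ok") = true
      · have hx : PySem.Str.slice (pvSuffix x) none (some 2) = "ok" := by simpa using h2
        rw [if_pos h2, ih]
        simp [h1, h2, ok_not_paytm x hx]
      · rw [if_neg h2]
        by_cases h3 : (pvSuffix x == "paytm") = true
        · rw [if_pos h3, ih]
          simp [h1, h2, h3]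
        · rw [if_neg h3, ih]
          simp [h1, h2, h3]

-- ===== VERDICT (by name: the statement is the Claim_ definition above) =====
theorem get_upi_ids_spec : Claim_equal_get_upi_ids := by
  intro upi_ids _
  unfold Spec_get_upi_ids get_upi_ids get_upi_ids_alt
  simp only [fold_eq, pvLastMatch_eq]
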